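-- pv_equiv track=rewrite | github.com/silmoon04/FitnessApp | fitness app.py | generate_workout_plan
-- ===== SOURCE A (Python) =====
-- def generate_workout_plan(detailed_plan, exercise_map):
--     # Method to generate a workout plan based on a detailed plan and an exercise map
--     # The workout plan is a dictionary where each key is a day and each value is a list of exercises for that day
--     # The method also keeps track of used exercises to avoid repetition
--
--     # Initialize the workout plan and used exercises
--     workout_plan = {}
--     used_exercises = {category: [] for category in exercise_map.keys()}
--
--     # Iterate over each day in the detailed plan
--     for day, muscle_groups in detailed_plan.items():
--         day_plan = []
--         # Iterate over each muscle group for the day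
--         for muscle_group in muscle_groups.split(', '):
--             highest_rated_exercise = None
--             highest_rating = -1
--             # Iterate over each category and subgroup in the exercise map
--             for category, subgroups in exercise_map.items():
--                 for subgroup, exercises in subgroups.items():
--                     # If the muscle group is in the subgroup and there are exercises
--                     if muscle_group in subgroup and exercises:
--                         # Iterate over each exercise and its rating
--                         for exercise, rating in exercises:
--                             # If the rating is higher than the current highest rating and the exercise has not been used
--                             if rating > highest_rating and exercise not in used_exercises[category]:
--                                 # Update the highest rated exercise and its rating
--                                 highest_rated_exercise = exercise
--                                 highest_rating = rating
--             # If a highest rated exercise was found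
--             if highest_rated_exercise:
--                 # Add the exercise to the day plan and mark it as used
--                 day_plan.append(highest_rated_exercise)
--                 for category, subgroups in exercise_map.items():
--                     if muscle_group in subgroups:
--                         used_exercises[category].append(highest_rated_exercise)
--                         break
--
--         # Add the day plan to the workout plan
--         workout_plan[f'{day}'] = day_plan
--
--     # Return the workout plan
--     return workout_plan
-- ===== SOURCE B (Python) =====
-- def generate_workout_plan(detailed_plan, exercise_map):
--     # Index-first approach: for each distinct muscle group, precompute its candidate
--     # exercises (rating > -1) stably sorted by descending rating, and the category used
--     # for marking; then each day/group just takes the first not-yet-used candidate.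
--     groups = list(dict.fromkeys(g for mgs in detailed_plan.values() for g in mgs.split(', ')))
--     cands = {}
--     mark = {}
--     for g in groups:
--         lst = [(ex, r, cat)
--                for cat, subs in exercise_map.items()
--                for sub, exs in subs.items() if g in sub
--                for ex, r in exs if r > -1]
--         lst.sort(key=lambda t: t[1], reverse=True)
--         cands[g] = lst
--         mark[g] = next((cat for cat, subs in exercise_map.items() if g in subs), None)
--     used = {cat: [] for cat in exercise_map}
--     plan = {}
--     for day, mgs in detailed_plan.items():
--         day_plan = []
--         for g in mgs.split(', '):
--             chosen = next((ex for ex, r, cat in cands[g] if ex not in used[cat]), None)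
--             if chosen:
--                 day_plan.append(chosen)
--                 if mark[g] is not None:
--                     used[mark[g]].append(chosen)
--         plan[f'{day}'] = day_plan
--     return plan
-- ===== Notes on version B (the rewrite author's own statement) =====
-- stated objective: faster
-- what changed: B precomputes, per distinct muscle group, a candidate index (rating > -1 triples stably sorted by descending rating) plus the marking category, so each day/group selection is a first-eligible scan of the sorted index instead of A's full rescan of the exercise map with a running maximum.
import Mathlib
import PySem

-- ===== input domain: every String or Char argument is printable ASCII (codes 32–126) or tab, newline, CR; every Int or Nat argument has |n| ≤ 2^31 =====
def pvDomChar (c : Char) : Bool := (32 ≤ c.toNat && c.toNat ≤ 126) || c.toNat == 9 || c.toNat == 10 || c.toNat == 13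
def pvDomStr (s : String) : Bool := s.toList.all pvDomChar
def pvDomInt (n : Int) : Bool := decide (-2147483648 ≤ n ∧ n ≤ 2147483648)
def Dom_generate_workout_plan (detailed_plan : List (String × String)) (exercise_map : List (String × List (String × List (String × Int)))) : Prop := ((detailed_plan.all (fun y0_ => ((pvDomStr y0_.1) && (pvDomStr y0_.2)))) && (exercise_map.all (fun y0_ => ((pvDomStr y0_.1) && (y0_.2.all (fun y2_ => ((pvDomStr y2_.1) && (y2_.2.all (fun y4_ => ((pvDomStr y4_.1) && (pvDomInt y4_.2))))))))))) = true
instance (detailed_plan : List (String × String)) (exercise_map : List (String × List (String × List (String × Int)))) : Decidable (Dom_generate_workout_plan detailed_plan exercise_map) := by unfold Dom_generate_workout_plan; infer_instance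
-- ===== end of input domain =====

-- B builds, per distinct muscle group, an index: the candidate list (rating > -1) stably
-- sorted by descending rating plus the marking category; each day/group then takes the
-- first not-yet-used candidate, instead of A's full rescan with a running maximum.
-- (A mutates nothing observable; equivalence is about the returned dict.)

-- ===== PORT A =====
-- Input-convention shims shared by both ports: the Python arguments are dicts (of dicts),
-- so the association lists are collapsed with Python's dict semantics (last value wins,
-- first position kept) before iteration, exactly as dict(pairs) would.
def pvNormEM (em : List (String × List (String × List (String × Int)))) : List (String × List (String × List (String × Int))) :=
  (PySem.Dict.ofList (em.map (fun c => (c.1, (PySem.Dict.ofList c.2).items)))).items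

-- muscle_groups.split(', '): the separator is non-empty, so split? is always `some`
def pvSplit (s : String) : List String := (PySem.Str.split? s ", ").getD []

-- the inner triple loop of A: running (highest_rated_exercise, highest_rating) scan
def aScan (used : PySem.Dict String (List String)) (g : String) (em' : List (String × List (String × List (String × Int)))) : Option String × Int :=
  em'.foldl (fun st c =>
    c.2.foldl (fun st sg =>
      if PySem.Str.isIn g sg.1 && !sg.2.isEmpty then
        sg.2.foldl (fun st e =>
          -- used_exercises[category] always has the key (it was initialised from the same keys)
          if decide (st.2 < e.2) && !((used.getD c.1 []).contains e.1) then (some e.1, e.2) else st) st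
      else st) st) ((none : Option String), (-1 : Int))

-- A's marking loop ('for category, subgroups ...: if muscle_group in subgroups: ...; break')
def aMark (em' : List (String × List (String × List (String × Int)))) (g : String) (used : PySem.Dict String (List String)) (ex : String) : PySem.Dict String (List String) :=
  match em'.find? (fun c => c.2.any (fun sg => sg.1 == g)) with
  | some c => used.modify c.1 [] (fun l => l ++ [ex])
  | none => used

def aGroupStep (em' : List (String × List (String × List (String × Int)))) (st2 : PySem.Dict String (List String) × List String) (g : String) : PySem.Dict String (List String) × List String :=
  match (aScan st2.1 g em').1 with
  | some ex => if ex == "" then st2 else (aMark em' g st2.1 ex, st2.2 ++ [ex])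
  | none => st2

def aDayStep (em' : List (String × List (String × List (String × Int)))) (st : PySem.Dict String (List String) × PySem.Dict String (List String)) (d : String × String) : PySem.Dict String (List String) × PySem.Dict String (List String) :=
  let r := (pvSplit d.2).foldl (aGroupStep em') (st.1, [])
  (r.1, st.2.insert d.1 r.2)

def generate_workout_plan (detailed_plan : List (String × String)) (exercise_map : List (String × List (String × List (String × Int)))) : List (String × List String) :=
  let em' := pvNormEM exercise_map
  let used0 : PySem.Dict String (List String) := PySem.Dict.ofList (em'.map (fun c => (c.1, ([] : List String))))
  (((PySem.Dict.ofList detailed_plan).items).foldl (aDayStep em') (used0, PySem.Dict.empty)).2.items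

-- ===== PORT B =====
-- per-group candidate list: (exercise, rating, category), rating > -1, sorted desc by rating
def bCandList (em' : List (String × List (String × List (String × Int)))) (g : String) : List (String × Int × String) :=
  PySem.List.sorted
    (em'.flatMap (fun c => (c.2.filter (fun sg => PySem.Str.isIn g sg.1)).flatMap (fun sg =>
       (sg.2.filter (fun e => decide (-1 < e.2))).map (fun e => (e.1, e.2, c.1)))))
    (fun t => t.2.1) true

def bMarkCat (em' : List (String × List (String × List (String × Int)))) (g : String) : Option String :=
  (em'.find? (fun c => c.2.any (fun sg => sg.1 == g))).map (fun c => c.1)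

def bGroupStep (cands : PySem.Dict String (List (String × Int × String))) (mark : PySem.Dict String (Option String)) (st2 : PySem.Dict String (List String) × List String) (g : String) : PySem.Dict String (List String) × List String :=
  match ((cands.getD g []).find? (fun t => !((st2.1.getD t.2.2 []).contains t.1))).map (fun t => t.1) with
  | some ex => if ex == "" then st2 else
      ((match mark.getD g none with
        | some c => st2.1.modify c [] (fun l => l ++ [ex])
        | none => st2.1), st2.2 ++ [ex])
  | none => st2

def bDayStep (cands : PySem.Dict String (List (String × Int × String))) (mark : PySem.Dict String (Option String)) (st : PySem.Dict String (List String) × PySem.Dict String (List String)) (d : String × String) : PySem.Dict String (List String) × PySem.Dict String (List String) :=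
  let r := (pvSplit d.2).foldl (bGroupStep cands mark) (st.1, [])
  (r.1, st.2.insert d.1 r.2)

def generate_workout_plan_alt (detailed_plan : List (String × String)) (exercise_map : List (String × List (String × List (String × Int)))) : List (String × List String) :=
  let em' := pvNormEM exercise_map
  let dpl := (PySem.Dict.ofList detailed_plan).items
  let groups := PySem.List.dedup (dpl.flatMap (fun d => pvSplit d.2))
  let cands := groups.foldl (fun (d : PySem.Dict String (List (String × Int × String))) g => d.insert g (bCandList em' g)) PySem.Dict.empty
  let mark := groups.foldl (fun (d : PySem.Dict String (Option String)) g => d.insert g (bMarkCat em' g)) PySem.Dict.empty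
  let used0 : PySem.Dict String (List String) := PySem.Dict.ofList (em'.map (fun c => (c.1, ([] : List String))))
  (dpl.foldl (bDayStep cands mark) (used0, PySem.Dict.empty)).2.items

-- ===== PRECONDITION & SPEC =====
def Spec_generate_workout_plan (detailed_plan : List (String × String)) (exercise_map : List (String × List (String × List (String × Int)))) (out : List (String × List String)) : Prop := out = generate_workout_plan_alt detailed_plan exercise_map
instance (detailed_plan : List (String × String)) (exercise_map : List (String × List (String × List (String × Int)))) (out : List (String × List String)) : Decidable (Spec_generate_workout_plan detailed_plan exercise_map out) := by unfold Spec_generate_workout_plan; infer_instance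

-- ===== CLAIM (what is proved, stated in full; the proofs are below) =====
def Claim_equal_generate_workout_plan : Prop := ∀ (detailed_plan : List (String × String)) (exercise_map : List (String × List (String × List (String × Int)))), Dom_generate_workout_plan detailed_plan exercise_map → Spec_generate_workout_plan detailed_plan exercise_map (generate_workout_plan detailed_plan exercise_map)

-- ===== LEMMAS AND PROOFS =====

-- looking up a key in a dict built by inserting f h for each h: later other-key inserts don't disturb it
lemma get?_foldl_insert_fn_not_mem {ν : Type} (t : List String) (f : String → ν) (d : PySem.Dict String ν) (g : String) (hg : g ∉ t) :
    (t.foldl (fun d h => d.insert h (f h)) d).get? g = d.get? g := by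
  induction t generalizing d with
  | nil => rfl
  | cons h t ih =>
    simp only [List.mem_cons, not_or] at hg
    simp only [List.foldl_cons, ih _ hg.2, PySem.Dict.get?_insert_of_ne _ _ hg.1]

lemma getD_foldl_insert_fn {ν : Type} (t : List String) (f : String → ν) (d : PySem.Dict String ν) (g : String) (dflt : ν) (hg : g ∈ t) :
    (t.foldl (fun d h => d.insert h (f h)) d).getD g dflt = f g := by
  induction t generalizing d with
  | nil => exact absurd hg (List.not_mem_nil)
  | cons h t ih =>
    by_cases hgt : g ∈ t
    · simpa only [List.foldl_cons] using ih _ hgt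
    · have hgh : g = h := by rcases List.mem_cons.mp hg with h1 | h1 <;> tauto
      subst hgh
      simp only [List.foldl_cons, PySem.Dict.getD, get?_foldl_insert_fn_not_mem _ _ _ _ hgt,
        PySem.Dict.get?_insert_self, Option.getD_some]

-- find? over a stable descending insertion: the running-first-max recurrence
lemma find?_insertBy_rev {α κ : Type} [LinearOrder κ] (key : α → κ) (P : α → Bool) (x : α) (S : List α)
    (hS : S.Pairwise (fun a b => key b ≤ key a)) :
    (PySem.List.insertBy (fun a b => decide (key b < key a)) x S).find? P =
      if P x then
        (match S.find? P with
         | some m => if key m < key x then some x else some m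
         | none => some x)
      else S.find? P := by
  induction S with
  | nil =>
    simp only [PySem.List.insertBy, List.find?_nil]
    cases hP : P x <;> simp [hP]
  | cons y S ih =>
    rw [List.pairwise_cons] at hS
    have hub : ∀ m ∈ y :: S, key m ≤ key y := by
      intro m hm
      rcases List.mem_cons.mp hm with rfl | hm
      · exact le_refl _
      · exact hS.1 m hm
    by_cases hxy : key y < key x
    · have : PySem.List.insertBy (fun a b => decide (key b < key a)) x (y :: S) = x :: y :: S := by
        simp [PySem.List.insertBy, hxy]
      rw [this]
      cases hP : P x with
      | false => simp [hP]
      | true =>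
        rw [List.find?_cons_of_pos hP]
        cases hf : (y :: S).find? P with
        | none => rfl
        | some m =>
          have hm : m ∈ y :: S := List.mem_of_find?_eq_some hf
          have : key m < key x := lt_of_le_of_lt (hub m hm) hxy
          simp [this]
    · have : PySem.List.insertBy (fun a b => decide (key b < key a)) x (y :: S) =
          y :: PySem.List.insertBy (fun a b => decide (key b < key a)) x S := by
        simp [PySem.List.insertBy, hxy]
      rw [this]
      cases hPy : P y with
      | true =>
        rw [List.find?_cons_of_pos hPy, List.find?_cons_of_pos hPy]
        cases hP : P x with
        | false => simp
        | true =>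
          have : ¬ key y < key x := hxy
          simp [this]
      | false =>
        rw [List.find?_cons_of_neg (by simp [hPy]), List.find?_cons_of_neg (by simp [hPy]), ih hS.2]

lemma max?_append_singleton {α κ : Type} [LT κ] [DecidableLT κ] (key : α → κ) (l : List α) (x : α) :
    PySem.List.max? (l ++ [x]) key =
      match PySem.List.max? l key with
      | none => some x
      | some m => if key m < key x then some x else some m := by
  simp only [PySem.List.max?, List.foldl_append, List.foldl_cons, List.foldl_nil]
  rfl

-- the crux: first eligible element of the stable descending sort = Python max() over the eligible ones
lemma find?_sorted_rev_eq_max?_filter {α κ : Type} [LinearOrder κ] (key : α → κ) (P : α → Bool) (F : List α) :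
    (PySem.List.sorted F key true).find? P = PySem.List.max? (F.filter P) key := by
  induction F using List.reverseRecOn with
  | nil => rfl
  | append_singleton F x ih =>
    have hsorted : PySem.List.sorted (F ++ [x]) key true =
        PySem.List.insertBy (fun a b => decide (key b < key a)) x (PySem.List.sorted F key true) := by
      rw [PySem.List.sorted_rev_eq_foldl_insertBy, PySem.List.sorted_rev_eq_foldl_insertBy,
        List.foldl_append, List.foldl_cons, List.foldl_nil]
    rw [hsorted, find?_insertBy_rev key P x _ (PySem.List.sorted_pairwise_rev F key), ih]
    rw [List.filter_append]
    cases hP : P x with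
    | false => simp [PySem.List.max?, hP]
    | true =>
      simp only [List.filter_cons, hP, List.filter_nil, if_true]
      rw [max?_append_singleton]
      cases h : PySem.List.max? (List.filter P F) key with
      | none => rfl
      | some m => rfl

-- eligibility of a candidate triple (exercise, rating, category) under the current used-dict
def eligB (used : PySem.Dict String (List String)) (t : String × Int × String) : Bool :=
  !((used.getD t.2.2 []).contains t.1)

def QB (used : PySem.Dict String (List String)) (t : String × Int × String) : Bool :=
  decide (-1 < t.2.1) && eligB used t

def toSt : Option (String × Int × String) → Option String × Int
  | none => (none, -1)
  | some t => (some t.1, t.2.1)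

-- A's flat candidate stream in scan order (no rating filter)
def flatA (em' : List (String × List (String × List (String × Int)))) (g : String) : List (String × Int × String) :=
  em'.flatMap (fun c => (c.2.filter (fun sg => PySem.Str.isIn g sg.1 && !sg.2.isEmpty)).flatMap (fun sg =>
    sg.2.map (fun e => (e.1, e.2, c.1))))

lemma aScan_eq_flat (used : PySem.Dict String (List String)) (g : String) (em' : List (String × List (String × List (String × Int)))) :
    aScan used g em' = (flatA em' g).foldl
      (fun st t => if decide (st.2 < t.2.1) && eligB used t then (some t.1, t.2.1) else st)
      ((none : Option String), (-1 : Int)) := by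
  rw [flatA, List.foldl_flatMap]
  unfold aScan
  apply PySem.List.foldl_congr_mem
  intro acc c _
  rw [List.foldl_flatMap, ← PySem.List.foldl_if_eq_foldl_filter]
  apply PySem.List.foldl_congr_mem
  intro acc2 sg _
  by_cases hsg : (PySem.Str.isIn g sg.1 && !sg.2.isEmpty) = true
  · simp only [hsg, if_true, List.foldl_map]; rfl
  · rw [Bool.not_eq_true] at hsg
    simp only [hsg, Bool.false_eq_true, if_false]

-- the running (best, rating) scan is Python max() over the QB-eligible candidates
def maxStep (acc : Option (String × Int × String)) (t : String × Int × String) : Option (String × Int × String) :=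
  match acc with
  | none => some t
  | some m => if m.2.1 < t.2.1 then some t else some m

lemma scan_eq_max?_aux (used : PySem.Dict String (List String)) (L : List (String × Int × String)) :
    ∀ (acc : Option (String × Int × String)), (∀ t, acc = some t → -1 < t.2.1) →
    L.foldl (fun st t => if decide (st.2 < t.2.1) && eligB used t then (some t.1, t.2.1) else st) (toSt acc)
      = toSt ((L.filter (QB used)).foldl maxStep acc) := by
  induction L with
  | nil => intro acc _; rfl
  | cons t L ih =>
    intro acc hacc
    rw [List.foldl_cons, List.filter_cons]
    cases acc with
    | none =>
      by_cases hQ : QB used t = true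
      · have hr : (-1 : Int) < t.2.1 := by unfold QB at hQ; simp at hQ; exact hQ.1
        have helig : eligB used t = true := by unfold QB at hQ; simp at hQ; exact hQ.2
        rw [if_pos hQ, List.foldl_cons]
        have hinit : (if decide ((toSt none).2 < t.2.1) && eligB used t then ((some t.1 : Option String), t.2.1) else toSt none) = toSt (some t) := by
          show (if decide ((-1 : Int) < t.2.1) && eligB used t then _ else _) = _
          rw [if_pos (by simp [hr, helig])]
          rfl
        rw [hinit, ih _ (by intro u hu; cases hu; exact hr)]
        rfl
      · rw [if_neg hQ]
        have hinit : (if decide ((toSt none).2 < t.2.1) && eligB used t then ((some t.1 : Option String), t.2.1) else toSt none) = toSt none := by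
          show (if decide ((-1 : Int) < t.2.1) && eligB used t then _ else _) = _
          rw [if_neg (by simpa [QB] using hQ)]
        rw [hinit, ih _ (by intro u hu; cases hu)]
    | some m =>
      have hm := hacc m rfl
      by_cases hQ : QB used t = true
      · have hr : (-1 : Int) < t.2.1 := by unfold QB at hQ; simp at hQ; exact hQ.1
        have helig : eligB used t = true := by unfold QB at hQ; simp at hQ; exact hQ.2
        rw [if_pos hQ, List.foldl_cons]
        by_cases hlt : m.2.1 < t.2.1
        · have hinit : (if decide ((toSt (some m)).2 < t.2.1) && eligB used t then ((some t.1 : Option String), t.2.1) else toSt (some m)) = toSt (some t) := by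
            show (if decide (m.2.1 < t.2.1) && eligB used t then _ else _) = _
            rw [if_pos (by simp [hlt, helig])]
            rfl
          rw [hinit, ih _ (by intro u hu; cases hu; exact hr)]
          have hstep : maxStep (some m) t = some t := by simp [maxStep, hlt]
          rw [hstep]
        · have hinit : (if decide ((toSt (some m)).2 < t.2.1) && eligB used t then ((some t.1 : Option String), t.2.1) else toSt (some m)) = toSt (some m) := by
            show (if decide (m.2.1 < t.2.1) && eligB used t then _ else _) = _
            rw [if_neg (by simp [hlt])]
          rw [hinit, ih _ hacc]
          have hstep : maxStep (some m) t = some m := by simp [maxStep, hlt]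
          rw [hstep]
      · rw [if_neg hQ]
        have hguard : (decide (m.2.1 < t.2.1) && eligB used t) = false := by
          unfold QB at hQ
          by_cases he : eligB used t = true
          · have hr' : ¬ ((-1 : Int) < t.2.1) := by
              intro h; exact hQ (by simp [he, h])
            have : ¬ (m.2.1 < t.2.1) := by omega
            simp [this]
          · simp only [Bool.not_eq_true] at he; simp [he]
        have hinit : (if decide ((toSt (some m)).2 < t.2.1) && eligB used t then ((some t.1 : Option String), t.2.1) else toSt (some m)) = toSt (some m) := by
          show (if decide (m.2.1 < t.2.1) && eligB used t then _ else _) = _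
          rw [if_neg (by simp [hguard])]
        rw [hinit, ih _ hacc]

lemma scan_eq_max? (used : PySem.Dict String (List String)) (L : List (String × Int × String)) :
    L.foldl (fun st t => if decide (st.2 < t.2.1) && eligB used t then (some t.1, t.2.1) else st)
      ((none : Option String), (-1 : Int))
    = toSt (PySem.List.max? (L.filter (QB used)) (fun t => t.2.1)) := by
  have h1 : PySem.List.max? (L.filter (QB used)) (fun t : String × Int × String => t.2.1)
      = (L.filter (QB used)).foldl maxStep none := by
    simp only [PySem.List.max?]
    apply PySem.List.foldl_congr_mem
    intro acc x _
    cases acc <;> rfl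
  rw [h1]
  exact scan_eq_max?_aux used L none (by intro u hu; cases hu)

-- B's candidate list is A's flat stream, rating-filtered then sorted
lemma bCandList_eq (em' : List (String × List (String × List (String × Int)))) (g : String) :
    bCandList em' g = PySem.List.sorted ((flatA em' g).filter (fun t => decide (-1 < t.2.1))) (fun t => t.2.1) true := by
  unfold bCandList flatA
  congr 1
  rw [List.filter_flatMap]
  apply List.flatMap_congr
  intro c _
  rw [List.filter_flatMap]
  induction c.2 with
  | nil => rfl
  | cons sg rest ih =>
    rw [List.filter_cons, List.filter_cons]
    by_cases hin : PySem.Str.isIn g sg.1 = true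
    · have hin' : PySem.Chars.isIn g.toList sg.1.toList = true := by simpa using hin
      rw [if_pos hin]
      by_cases hne : sg.2.isEmpty = true
      · have h2 : sg.2 = [] := by simpa using hne
        rw [if_neg (by simp [hin', hne]), List.flatMap_cons, h2]
        simpa using ih
      · rw [if_pos (by simp [hin', hne]), List.flatMap_cons, List.flatMap_cons, ih, List.filter_map]
        have hpf : List.filter ((fun t : String × Int × String => decide (-1 < t.2.1)) ∘ fun e : String × Int => (e.1, e.2, c.1)) sg.2
            = List.filter (fun e => decide (-1 < e.2)) sg.2 := List.filter_congr (fun e _ => rfl)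
        rw [hpf]
    · have hin' : PySem.Chars.isIn g.toList sg.1.toList = false := by
        rw [Bool.not_eq_true] at hin; simpa using hin
      rw [if_neg hin, if_neg (by simp [hin']), ih]

-- per-group selection: A's scan returns exactly B's first eligible sorted candidate
lemma select_eq (used : PySem.Dict String (List String)) (g : String) (em' : List (String × List (String × List (String × Int)))) :
    (aScan used g em').1 = ((bCandList em' g).find? (fun t => eligB used t)).map (fun t => t.1) := by
  rw [aScan_eq_flat, scan_eq_max?, bCandList_eq,
    find?_sorted_rev_eq_max?_filter (fun t : String × Int × String => t.2.1) (fun t => eligB used t)]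
  rw [List.filter_filter]
  have hfe : (flatA em' g).filter (fun t => QB used t) =
      (flatA em' g).filter (fun a => eligB used a && decide (-1 < a.2.1)) := by
    apply List.filter_congr; intro t _; unfold QB; rw [Bool.and_comm]
  rw [hfe]
  cases PySem.List.max? ((flatA em' g).filter (fun a => eligB used a && decide (-1 < a.2.1))) (fun t => t.2.1) with
  | none => rfl
  | some t => rfl

-- ===== the two step functions agree on every group of the plan =====
lemma groupStep_eq (em' : List (String × List (String × List (String × Int)))) (groups : List String)
    (g : String) (hg : g ∈ groups) (st2 : PySem.Dict String (List String) × List String) :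
    aGroupStep em' st2 g =
      bGroupStep (groups.foldl (fun d g => d.insert g (bCandList em' g)) PySem.Dict.empty)
        (groups.foldl (fun d g => d.insert g (bMarkCat em' g)) PySem.Dict.empty) st2 g := by
  unfold aGroupStep bGroupStep
  rw [getD_foldl_insert_fn groups (fun g => bCandList em' g) _ _ _ hg,
    getD_foldl_insert_fn groups (fun g => bMarkCat em' g) _ _ _ hg]
  rw [select_eq st2.1 g em']
  have helig : (fun t : String × Int × String => !((st2.1.getD t.2.2 []).contains t.1)) = fun t => eligB st2.1 t := rfl
  rw [helig]
  cases hfind : (bCandList em' g).find? (fun t => eligB st2.1 t) with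
  | none => rfl
  | some t =>
    simp only [Option.map_some]
    by_cases hex : (t.1 == "") = true
    · simp [hex]
    · simp only [hex, Bool.false_eq_true, if_false]
      unfold aMark bMarkCat
      cases em'.find? (fun c => c.2.any (fun sg => sg.1 == g)) with
      | none => rfl
      | some c => rfl

theorem generate_workout_plan_spec : Claim_equal_generate_workout_plan := by
  intro detailed_plan exercise_map _
  unfold Spec_generate_workout_plan generate_workout_plan generate_workout_plan_alt
  simp only []
  congr 1
  congr 1
  apply PySem.List.foldl_congr_mem
  intro acc d hd
  unfold aDayStep bDayStep
  have : (pvSplit d.2).foldl (aGroupStep (pvNormEM exercise_map)) (acc.1, []) =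
      (pvSplit d.2).foldl
        (bGroupStep
          ((PySem.List.dedup (((PySem.Dict.ofList detailed_plan).items).flatMap (fun d => pvSplit d.2))).foldl
            (fun dd g => dd.insert g (bCandList (pvNormEM exercise_map) g)) PySem.Dict.empty)
          ((PySem.List.dedup (((PySem.Dict.ofList detailed_plan).items).flatMap (fun d => pvSplit d.2))).foldl
            (fun dd g => dd.insert g (bMarkCat (pvNormEM exercise_map) g)) PySem.Dict.empty))
        (acc.1, []) := by
    apply PySem.List.foldl_congr_mem
    intro acc2 g hgmem
    apply groupStep_eq
    rw [PySem.List.mem_dedup]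
    exact List.mem_flatMap.mpr ⟨d, hd, hgmem⟩
  rw [this]
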